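-- pv_equiv track=rewrite | github.com/ggambetta/emulator-backed-remakes | generator/generator.py | insertCode
-- ===== SOURCE A (Python) =====
-- GENERATED_CODE_BEGIN = "// BEGIN GENERATED CODE"
--
-- GENERATED_CODE_END = "// END GENERATED CODE"
--
-- def insertCode(template, code, marker):
--   lines = template.split("\n")
--   out = []
--   for line in lines:
--     idx = line.find(marker)
--     if idx == -1:
--       out.append(line)
--       continue
--
--     indent = line[:idx]
--     out.append(indent + GENERATED_CODE_BEGIN)
--     for code_line in code.split("\n"):
--       out.append(indent + code_line)
--     out.append(indent + GENERATED_CODE_END)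
--
--   return "\n".join(out)
-- ===== SOURCE B (Python) =====
-- GENERATED_CODE_BEGIN = "// BEGIN GENERATED CODE"
--
-- GENERATED_CODE_END = "// END GENERATED CODE"
--
-- def insertCode(template, code, marker):
--   # A marker containing a newline can never occur inside a single line.
--   if "\n" in marker:
--     return template
--   out = ""
--   s = template
--   while True:
--     # s always starts at a line boundary; jump straight to the next marker,
--     # copying everything before that marker's line unchanged.
--     pos = s.find(marker)
--     if pos == -1:
--       return out + s
--     ls = s.rfind("\n", 0, pos) + 1
--     indent = s[ls:pos]
--     block = "\n".join([indent + GENERATED_CODE_BEGIN]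
--                       + [indent + cl for cl in code.split("\n")]
--                       + [indent + GENERATED_CODE_END])
--     le = s.find("\n", pos)
--     if le == -1:
--       return out + s[:ls] + block
--     out += s[:ls] + block + "\n"
--     s = s[le + 1:]
-- ===== Notes on version B (the rewrite author's own statement) =====
-- stated objective: alternative
-- what changed: A splits the template into lines and scans every line for the marker with nested output-append loops; B never splits: it searches the flat template string for the next marker occurrence (str.find), locates that line's boundaries with rfind/find of the newline, copies everything before the line in one slice, emits the indented block built by a single join, and resumes after the line, so marker-free text is skipped in bulk; a marker containing a newline returns the template unchanged since it can never match inside a line.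
import Mathlib
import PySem

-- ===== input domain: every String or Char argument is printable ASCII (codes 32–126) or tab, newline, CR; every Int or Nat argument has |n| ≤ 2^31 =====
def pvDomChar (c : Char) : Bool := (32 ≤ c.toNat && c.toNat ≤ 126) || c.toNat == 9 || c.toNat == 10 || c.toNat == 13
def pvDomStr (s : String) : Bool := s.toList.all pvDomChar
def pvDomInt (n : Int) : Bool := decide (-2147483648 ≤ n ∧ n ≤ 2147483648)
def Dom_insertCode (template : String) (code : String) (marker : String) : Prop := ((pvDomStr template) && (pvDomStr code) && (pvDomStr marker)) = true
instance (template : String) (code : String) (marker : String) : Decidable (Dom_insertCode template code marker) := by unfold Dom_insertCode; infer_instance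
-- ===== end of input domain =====

-- B replaces A's split-into-lines-and-scan-each-line loop by a flat search over the whole
-- template: it repeatedly jumps to the next marker occurrence, copies everything before that
-- marker's line in one slice, emits the indented block, and resumes after the line's newline;
-- alternative decomposition, same cost.

def pvBegin : List Char := "// BEGIN GENERATED CODE".toList
def pvEnd : List Char := "// END GENERATED CODE".toList

-- ===== PORT A =====
def insertCodeCore (template : List Char) (code : List Char) (marker : List Char) : List Char :=
  let lines := PySem.Chars.splitOn template ['\n']
  let out := lines.foldl (fun out line =>
    let idx := PySem.Chars.find line marker
    if idx = -1 then out ++ [line]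
    else
      let indent := PySem.List.slice line none (some idx)
      let out := out ++ [indent ++ pvBegin]
      let out := (PySem.Chars.splitOn code ['\n']).foldl
        (fun out codeLine => out ++ [indent ++ codeLine]) out
      out ++ [indent ++ pvEnd]) []
  PySem.Chars.join ['\n'] out

def insertCode (template : String) (code : String) (marker : String) : String :=
  String.ofList (insertCodeCore template.toList code.toList marker.toList)

-- ===== PORT B =====
-- block = "\n".join([indent + BEGIN] + [indent + cl for cl in code.split("\n")] + [indent + END])
def blockFor (code : List Char) (indent : List Char) : List Char :=
  PySem.Chars.join ['\n'] ([indent ++ pvBegin]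
    ++ (PySem.Chars.splitOn code ['\n']).map (fun cl => indent ++ cl)
    ++ [indent ++ pvEnd])

-- termination of the search loop: the recursive call resumes strictly after a newline
theorem goB_dec (s marker : List Char) (hpos : ¬ PySem.Chars.find s marker = -1)
    (hle : ¬ PySem.Chars.findFrom s ['\n'] (PySem.Chars.find s marker) none = -1) :
    (PySem.List.slice s (some (PySem.Chars.findFrom s ['\n'] (PySem.Chars.find s marker) none + 1)) none).length < s.length := by
  have h0 : 0 ≤ PySem.Chars.find s marker := by
    have := PySem.Chars.neg_one_le_find s marker
    omega
  have hlen : PySem.Chars.find s marker ≤ (s.length : Int) := PySem.Chars.find_le_length s marker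
  have hcast : PySem.Chars.find s marker = (((PySem.Chars.find s marker).toNat : Nat) : Int) := by
    omega
  rw [hcast] at hle ⊢
  obtain ⟨hge, hpre, -⟩ := PySem.Chars.findFrom_natCast_spec s ['\n']
    (PySem.Chars.find s marker).toNat (by omega) hle
  have hFlt : (PySem.Chars.findFrom s ['\n'] (((PySem.Chars.find s marker).toNat : Nat) : Int) none).toNat < s.length := by
    by_contra hcon
    rw [List.drop_eq_nil_of_le (by omega)] at hpre
    simp at hpre
  rw [PySem.List.slice_from s (by omega), List.length_drop]
  omega

-- the while loop of B: `out` is the output accumulated so far, `s` the unprocessed tail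
def goB (code marker : List Char) (out s : List Char) : List Char :=
  let pos := PySem.Chars.find s marker
  if hpos : pos = -1 then out ++ s
  else
    let ls := PySem.Chars.rfindFrom s ['\n'] 0 (some pos) + 1
    let indent := PySem.List.slice s (some ls) (some pos)
    let block := blockFor code indent
    let le := PySem.Chars.findFrom s ['\n'] pos
    if hle : le = -1 then out ++ PySem.List.slice s none (some ls) ++ block
    else goB code marker (out ++ PySem.List.slice s none (some ls) ++ block ++ ['\n'])
           (PySem.List.slice s (some (le + 1)) none)
termination_by s.length
decreasing_by exact goB_dec s marker hpos hle

def insertCode_alt (template : String) (code : String) (marker : String) : String :=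
  if PySem.Chars.isIn ['\n'] marker.toList then template
  else String.ofList (goB code.toList marker.toList [] template.toList)

-- ===== PRECONDITION & SPEC =====
def Spec_insertCode (template : String) (code : String) (marker : String) (out : String) : Prop := out = insertCode_alt template code marker
instance (template : String) (code : String) (marker : String) (out : String) : Decidable (Spec_insertCode template code marker out) := by unfold Spec_insertCode; infer_instance

-- ===== CLAIM (what is proved, stated in full; the proofs are below) =====
def Claim_equal_insertCode : Prop := ∀ (template : String) (code : String) (marker : String), Dom_insertCode template code marker → Spec_insertCode template code marker (insertCode template code marker)

-- ===== LEMMAS AND PROOFS =====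

-- what A does to one line
def render1 (code marker line : List Char) : List Char :=
  if PySem.Chars.find line marker = -1 then line
  else blockFor code (PySem.List.slice line none (some (PySem.Chars.find line marker)))

-- what both sides produce for a whole text
def specR (code marker s : List Char) : List Char :=
  PySem.Chars.join ['\n'] ((PySem.Chars.splitOn s ['\n']).map (render1 code marker))

-- ---------- generic join / splitOn facts ----------

theorem join_cons_ne (sep a : List Char) (S : List (List Char)) (h : S ≠ []) :
    PySem.Chars.join sep (a :: S) = a ++ sep ++ PySem.Chars.join sep S := by
  cases S with
  | nil => exact absurd rfl h
  | cons q rest => exact PySem.Chars.join_cons_cons sep a q rest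

theorem join_append_ne (sep : List Char) (as bs : List (List Char)) (ha : as ≠ []) (hb : bs ≠ []) :
    PySem.Chars.join sep (as ++ bs) = PySem.Chars.join sep as ++ sep ++ PySem.Chars.join sep bs := by
  induction as with
  | nil => exact absurd rfl ha
  | cons a as ih =>
    cases as with
    | nil =>
      simp [PySem.Chars.join_singleton, join_cons_ne sep a bs hb]
    | cons a' as' =>
      rw [List.cons_append, join_cons_ne sep a ((a' :: as') ++ bs) (by simp),
        ih (by simp), PySem.Chars.join_cons_cons]
      simp [List.append_assoc]

theorem splitOn_go_acc (sep : List Char) :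
    ∀ (fuel : Nat) (l cur : List Char) (accs : List (List Char)),
      PySem.Chars.splitOn.go sep fuel l cur accs
        = accs.reverse ++ (PySem.Chars.splitOn.go sep fuel l [] []).modifyHead (cur.reverse ++ ·) := by
  intro fuel
  induction fuel with
  | zero => intro l cur accs; simp [PySem.Chars.splitOn.go, List.modifyHead]
  | succ f ih =>
    intro l cur accs
    cases l with
    | nil => simp [PySem.Chars.splitOn.go, List.modifyHead]
    | cons c t =>
      simp only [PySem.Chars.splitOn.go]
      split
      · simp only [List.reverse_nil]
        rw [ih _ _ (cur.reverse :: accs), ih _ _ ([[]] : List (List Char))]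
        cases hg : PySem.Chars.splitOn.go sep f (List.drop sep.length (c :: t)) [] [] with
        | nil => simp [List.modifyHead]
        | cons g G => simp [List.modifyHead]
      · rw [ih t (c :: cur) accs, ih t [c] ([] : List (List Char))]
        cases hg : PySem.Chars.splitOn.go sep f t [] [] with
        | nil => simp [List.modifyHead]
        | cons g G => simp [List.modifyHead, List.append_assoc]

theorem splitOn_go_ne_nil (sep : List Char) :
    ∀ (fuel : Nat) (l : List Char), PySem.Chars.splitOn.go sep fuel l [] [] ≠ [] := by
  intro fuel
  induction fuel with
  | zero => intro l; simp [PySem.Chars.splitOn.go]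
  | succ f ih =>
    intro l
    cases l with
    | nil => simp [PySem.Chars.splitOn.go]
    | cons c t =>
      simp only [PySem.Chars.splitOn.go]
      split
      · rw [splitOn_go_acc]
        simp
      · rw [splitOn_go_acc]
        simp only [List.reverse_nil, List.nil_append]
        intro hcon
        exact ih t (by cases hg : PySem.Chars.splitOn.go sep f t [] [] <;> simp_all [List.modifyHead])

theorem splitOn_ne_nil (s sep : List Char) : PySem.Chars.splitOn s sep ≠ [] := by
  rw [PySem.Chars.splitOn]; exact splitOn_go_ne_nil sep (s.length + 1) s

theorem isPrefixOf_single_cons (c x : Char) (t : List Char) :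
    List.isPrefixOf [c] (x :: t) = (c == x) := by
  simp [List.isPrefixOf]

theorem splitOn_go_nonl (c : Char) :
    ∀ (fuel : Nat) (l cur : List Char) (accs : List (List Char)), l.length < fuel → c ∉ l →
      PySem.Chars.splitOn.go [c] fuel l cur accs = accs.reverse ++ [cur.reverse ++ l] := by
  intro fuel
  induction fuel with
  | zero => intro l cur accs h _; omega
  | succ f ih =>
    intro l cur accs h hc
    cases l with
    | nil => simp [PySem.Chars.splitOn.go]
    | cons x t =>
      simp only [PySem.Chars.splitOn.go, isPrefixOf_single_cons]
      rw [if_neg (by simp at hc ⊢; exact hc.1)]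
      rw [ih t (x :: cur) accs (by simp at h ⊢; omega) (by simp at hc ⊢; exact hc.2)]
      simp

theorem splitOn_no_nl (c : Char) (s : List Char) (h : c ∉ s) :
    PySem.Chars.splitOn s [c] = [s] := by
  rw [PySem.Chars.splitOn]
  simpa using splitOn_go_nonl c (s.length + 1) s [] [] (by omega) h

theorem splitOn_go_fuel_irrel (c : Char) :
    ∀ (l : List Char) (f1 f2 : Nat), l.length < f1 → l.length < f2 →
      PySem.Chars.splitOn.go [c] f1 l [] [] = PySem.Chars.splitOn.go [c] f2 l [] [] := by
  intro l
  induction l with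
  | nil =>
    intro f1 f2 h1 h2
    cases f1 with
    | zero => omega
    | succ g1 => cases f2 with
      | zero => omega
      | succ g2 => simp [PySem.Chars.splitOn.go]
  | cons x t ih =>
    intro f1 f2 h1 h2
    cases f1 with
    | zero => omega
    | succ g1 => cases f2 with
      | zero => omega
      | succ g2 =>
        simp only [PySem.Chars.splitOn.go, isPrefixOf_single_cons]
        by_cases hx : c = x
        · rw [if_pos (by simp [hx]), if_pos (by simp [hx])]
          simp only [List.length_cons, List.length_nil, List.drop_succ_cons, List.drop_zero,
            List.reverse_nil]
          rw [splitOn_go_acc [c] g1 t [] [[]], splitOn_go_acc [c] g2 t [] [[]]]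
          rw [ih g1 g2 (by simp at h1; omega) (by simp at h2; omega)]
        · rw [if_neg (by simp [hx]), if_neg (by simp [hx])]
          rw [splitOn_go_acc [c] g1 t [x] [], splitOn_go_acc [c] g2 t [x] []]
          rw [ih g1 g2 (by simp at h1; omega) (by simp at h2; omega)]

theorem splitOn_go_split (c : Char) :
    ∀ (l : List Char) (fuel : Nat) (t : List Char), c ∉ l → (l ++ c :: t).length < fuel →
      PySem.Chars.splitOn.go [c] fuel (l ++ c :: t) [] []
        = l :: PySem.Chars.splitOn.go [c] (t.length + 1) t [] [] := by
  intro l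
  induction l with
  | nil =>
    intro fuel t _ h
    cases fuel with
    | zero => simp at h
    | succ f =>
      simp only [List.nil_append, PySem.Chars.splitOn.go, isPrefixOf_single_cons]
      rw [if_pos (by simp)]
      simp only [List.length_cons, List.length_nil, List.drop_succ_cons, List.drop_zero,
        List.reverse_nil]
      rw [splitOn_go_acc [c] f t [] [[]]]
      rw [splitOn_go_fuel_irrel c t f (t.length + 1) (by simp at h; omega) (by omega)]
      cases hg : PySem.Chars.splitOn.go [c] (t.length + 1) t [] [] with
      | nil => exact absurd hg (splitOn_go_ne_nil [c] _ t)
      | cons g G => simp [List.modifyHead]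
  | cons x l' ih =>
    intro fuel t hc h
    cases fuel with
    | zero => simp at h
    | succ f =>
      simp only [List.cons_append, PySem.Chars.splitOn.go, isPrefixOf_single_cons]
      rw [if_neg (by simp at hc ⊢; exact hc.1)]
      rw [splitOn_go_acc [c] f (l' ++ c :: t) [x] []]
      rw [ih f t (by simp at hc ⊢; exact hc.2) (by simp at h ⊢; omega)]
      simp [List.modifyHead]

theorem splitOn_split (c : Char) (l t : List Char) (hl : c ∉ l) :
    PySem.Chars.splitOn (l ++ c :: t) [c] = l :: PySem.Chars.splitOn t [c] := by
  rw [PySem.Chars.splitOn, PySem.Chars.splitOn]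
  exact splitOn_go_split c l ((l ++ c :: t).length + 1) t hl (by omega)

-- first-newline decomposition of a string
theorem drop_append_gt {α : Type} (u v : List α) (j : Nat) (h : u.length ≤ j) :
    List.drop j (u ++ v) = List.drop (j - u.length) v := by
  rw [List.drop_append, List.drop_eq_nil_of_le h, List.nil_append]

theorem drop_append_cons_gt {α : Type} (u v : List α) (c : α) (j : Nat) (h : u.length < j) :
    List.drop j (u ++ c :: v) = List.drop (j - u.length - 1) v := by
  obtain ⟨q, hq⟩ : ∃ q, j - u.length = q + 1 := ⟨j - u.length - 1, by omega⟩
  rw [drop_append_gt u (c :: v) j (by omega), hq, List.drop_succ_cons]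
  congr 1

theorem first_sep_decomp (c : Char) (s : List Char) :
    c ∉ s ∨ ∃ l t, s = l ++ c :: t ∧ c ∉ l := by
  induction s with
  | nil => exact Or.inl (by simp)
  | cons x s ih =>
    by_cases hx : x = c
    · exact Or.inr ⟨[], s, by simp [hx], by simp⟩
    · rcases ih with h | ⟨l, t, rfl, hl⟩
      · refine Or.inl ?_
        simp only [List.mem_cons, not_or]
        exact ⟨fun hc => hx hc.symm, h⟩
      · refine Or.inr ⟨x :: l, t, by simp, ?_⟩
        simp only [List.mem_cons, not_or]
        exact ⟨fun hc => hx hc.symm, hl⟩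

theorem join_splitOn_self (c : Char) (s : List Char) :
    PySem.Chars.join [c] (PySem.Chars.splitOn s [c]) = s := by
  suffices h : ∀ (n : Nat) (s : List Char), s.length ≤ n →
      PySem.Chars.join [c] (PySem.Chars.splitOn s [c]) = s from h s.length s (le_refl _)
  intro n
  induction n with
  | zero =>
    intro s h
    have hs : s = [] := by cases s with | nil => rfl | cons a b => simp at h
    subst hs
    rw [splitOn_no_nl c [] (by simp), PySem.Chars.join_singleton]
  | succ n ih =>
    intro s h
    rcases first_sep_decomp c s with hno | ⟨l, t, rfl, hl⟩
    · rw [splitOn_no_nl c s hno, PySem.Chars.join_singleton]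
    · rw [splitOn_split c l t hl, join_cons_ne _ _ _ (splitOn_ne_nil t [c]),
        ih t (by simp at h; omega)]
      simp

theorem lines_no_sep (c : Char) (s line : List Char) (h : line ∈ PySem.Chars.splitOn s [c]) :
    c ∉ line := by
  suffices hh : ∀ (n : Nat) (s line : List Char), s.length ≤ n →
      line ∈ PySem.Chars.splitOn s [c] → c ∉ line from hh s.length s line (le_refl _) h
  intro n
  induction n with
  | zero =>
    intro s line hn hmem
    have hs : s = [] := by cases s with | nil => rfl | cons a b => simp at hn
    subst hs
    rw [splitOn_no_nl c [] (by simp)] at hmem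
    simp at hmem
    simp [hmem]
  | succ n ih =>
    intro s line hn hmem
    rcases first_sep_decomp c s with hno | ⟨l, t, rfl, hl⟩
    · rw [splitOn_no_nl c s hno] at hmem
      simp at hmem
      exact hmem ▸ hno
    · rw [splitOn_split c l t hl] at hmem
      rcases List.mem_cons.mp hmem with rfl | htail
      · exact hl
      · exact ih t line (by simp at hn; omega) htail

theorem line_infix (c : Char) (s line : List Char) (h : line ∈ PySem.Chars.splitOn s [c]) :
    line <:+: s := by
  suffices hh : ∀ (n : Nat) (s line : List Char), s.length ≤ n →
      line ∈ PySem.Chars.splitOn s [c] → line <:+: s from hh s.length s line (le_refl _) h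
  intro n
  induction n with
  | zero =>
    intro s line hn hmem
    have hs : s = [] := by cases s with | nil => rfl | cons a b => simp at hn
    subst hs
    rw [splitOn_no_nl c [] (by simp)] at hmem
    simp at hmem
    simp [hmem]
  | succ n ih =>
    intro s line hn hmem
    rcases first_sep_decomp c s with hno | ⟨l, t, rfl, hl⟩
    · rw [splitOn_no_nl c s hno] at hmem
      simp at hmem
      exact hmem ▸ List.infix_refl s
    · rw [splitOn_split c l t hl] at hmem
      rcases List.mem_cons.mp hmem with rfl | htail
      · exact (List.prefix_append line (c :: t)).isInfix
      · exact (ih t line (by simp at hn; omega) htail).trans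
          ⟨l ++ [c], [], by simp⟩

-- ---------- prefix / find facts ----------

theorem single_prefix_iff (c : Char) (w : List Char) :
    [c] <+: w ↔ w[0]? = some c := by
  cases w with
  | nil => simp
  | cons x t =>
    simp [List.cons_prefix_cons, eq_comm]

theorem single_infix_iff (c : Char) (w : List Char) : [c] <:+: w ↔ c ∈ w := by
  constructor
  · intro h; exact (List.singleton_sublist).mp h.sublist
  · intro h
    rcases List.append_of_mem h with ⟨u, v, rfl⟩
    exact ⟨u, v, by simp⟩

theorem prefix_append_short {m u v : List Char} (h : m <+: u ++ v) (hlen : m.length ≤ u.length) :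
    m <+: u := by
  have := List.prefix_iff_eq_take.mp h
  rw [List.take_append_of_le_length hlen] at this
  exact this ▸ List.take_prefix m.length u

theorem prefix_append_cons_mem {m u v : List Char} {c : Char}
    (h : m <+: u ++ c :: v) (hlen : u.length < m.length) : c ∈ m := by
  have hg : m[u.length] = (u ++ c :: v)[u.length]'(by simp) := List.IsPrefix.getElem h hlen
  have : (u ++ c :: v)[u.length]'(by simp) = c := by
    rw [List.getElem_append_right (by omega)]
    simp
  rw [this] at hg
  exact hg ▸ List.getElem_mem hlen

theorem find_eq_of (s m : List Char) (k : Nat) (hp : m <+: s.drop k)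
    (hmin : ∀ j < k, ¬ m <+: s.drop j) : PySem.Chars.find s m = (k : Int) := by
  have hinf : m <:+: s := hp.isInfix.trans (List.drop_suffix k s).isInfix
  have h0 : 0 ≤ PySem.Chars.find s m := (PySem.Chars.find_nonneg_iff s m).mpr hinf
  obtain ⟨hpre, hm⟩ := PySem.Chars.find_spec h0
  rcases Nat.lt_trichotomy (PySem.Chars.find s m).toNat k with h | h | h
  · exact absurd hpre (hmin _ h)
  · omega
  · exact absurd hp (hm k h)

theorem find_append_left (l t m : List Char) (c : Char) (h0 : 0 ≤ PySem.Chars.find l m)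
    (hc : c ∉ m) : PySem.Chars.find (l ++ c :: t) m = PySem.Chars.find l m := by
  obtain ⟨hpre, hmin⟩ := PySem.Chars.find_spec h0
  have hk : (PySem.Chars.find l m).toNat ≤ l.length := by
    have := PySem.Chars.find_le_length l m; omega
  rw [find_eq_of (l ++ c :: t) m (PySem.Chars.find l m).toNat ?_ ?_]
  · omega
  · rw [List.drop_append_of_le_length hk]
    exact hpre.trans (List.prefix_append _ _)
  · intro j hj hcon
    rw [List.drop_append_of_le_length (by omega)] at hcon
    by_cases hlen : m.length ≤ (l.drop j).length
    · exact hmin j hj (prefix_append_short hcon hlen)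
    · exact hc (prefix_append_cons_mem hcon (by omega))

theorem infix_trichotomy (l t m : List Char) (c : Char) (hc : c ∉ m)
    (h : m <:+: l ++ c :: t) (hl : ¬ m <:+: l) : m <:+: t := by
  have := (PySem.Chars.exists_prefix_drop_iff_isIn m (l ++ c :: t)).mpr
    ((PySem.Chars.isIn_iff_infix m _).mpr h)
  rcases this with ⟨j, hj⟩
  by_cases hjl : j ≤ l.length
  · rw [List.drop_append_of_le_length hjl] at hj
    by_cases hlen : m.length ≤ (l.drop j).length
    · exact absurd (List.IsInfix.trans (prefix_append_short hj hlen).isInfix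
        (List.drop_suffix j l).isInfix) hl
    · exact absurd (prefix_append_cons_mem hj (by omega)) hc
  · have hj' : m <+: t.drop (j - l.length - 1) := by
      have hdj := drop_append_cons_gt l t c j (by omega)
      rwa [hdj] at hj
    exact hj'.isInfix.trans (List.drop_suffix _ t).isInfix

theorem find_append_right (l t m : List Char) (c : Char) (hc : c ∉ m)
    (hl : ¬ m <:+: l) (ht : 0 ≤ PySem.Chars.find t m) :
    PySem.Chars.find (l ++ c :: t) m = (l.length : Int) + 1 + PySem.Chars.find t m := by
  obtain ⟨hpre, hmin⟩ := PySem.Chars.find_spec ht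
  rw [find_eq_of (l ++ c :: t) m (l.length + 1 + (PySem.Chars.find t m).toNat) ?_ ?_]
  · push_cast; omega
  · have hdj : List.drop (l.length + 1 + (PySem.Chars.find t m).toNat) (l ++ c :: t)
        = t.drop (PySem.Chars.find t m).toNat := by
      rw [drop_append_cons_gt l t c _ (by omega)]
      congr 1
      omega
    rw [hdj]; exact hpre
  · intro j hj hcon
    by_cases hjl : j ≤ l.length
    · rw [List.drop_append_of_le_length hjl] at hcon
      by_cases hlen : m.length ≤ (l.drop j).length
      · exact hl (List.IsInfix.trans (prefix_append_short hcon hlen).isInfix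
          (List.drop_suffix j l).isInfix)
      · exact hc (prefix_append_cons_mem hcon (by omega))
    · have hdj := drop_append_cons_gt l t c j (by omega)
      rw [hdj] at hcon
      exact hmin _ (by omega) hcon

theorem find_no_sep (u v : List Char) (c : Char) (hu : c ∉ u) :
    PySem.Chars.find (u ++ c :: v) [c] = (u.length : Int) := by
  rw [find_eq_of (u ++ c :: v) [c] u.length ?_ ?_]
  · rw [List.drop_append_of_le_length (le_refl _)]
    simp
  · intro j hj hcon
    rw [List.drop_append_of_le_length (by omega)] at hcon
    rw [single_prefix_iff, List.getElem?_append_left (by simp; omega),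
      List.getElem?_drop] at hcon
    exact hu (List.mem_of_getElem? (by simpa using hcon))

theorem find_single_neg (w : List Char) (c : Char) (hc : c ∉ w) :
    PySem.Chars.find w [c] = -1 := by
  rw [PySem.Chars.find_eq_neg_one_iff, single_infix_iff]
  exact hc

-- ---------- rfind facts ----------

theorem rfind_go_neg (s sub : List Char) :
    ∀ j, (∀ p ≤ j, ¬ List.isPrefixOf sub (s.drop p) = true) →
      PySem.Chars.rfind.go s sub j = -1 := by
  intro j
  induction j with
  | zero => intro h; simp [PySem.Chars.rfind.go]; intro hc; exact (h 0 (by omega)) (by simpa using hc)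
  | succ n ih =>
    intro h
    rw [PySem.Chars.rfind.go]
    rw [if_neg (by simpa using h (n+1) (by omega))]
    exact ih (fun p hp => h p (by omega))

theorem rfind_go_pos (s sub : List Char) :
    ∀ j k, k ≤ j → List.isPrefixOf sub (s.drop k) = true →
      (∀ p, k < p → p ≤ j → ¬ List.isPrefixOf sub (s.drop p) = true) →
      PySem.Chars.rfind.go s sub j = (k : Int) := by
  intro j
  induction j with
  | zero =>
    intro k hk hp _
    have hk0 : k = 0 := by omega
    subst hk0
    rw [PySem.Chars.rfind.go, if_pos (by simpa using hp)]
    simp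
  | succ n ih =>
    intro k hk hp hmin
    rw [PySem.Chars.rfind.go]
    by_cases hke : k = n + 1
    · subst hke; rw [if_pos (by simpa using hp)]
    · rw [if_neg (by simpa using hmin (n+1) (by omega) (by omega))]
      exact ih k (by omega) hp (fun p h1 h2 => hmin p h1 (by omega))

theorem neg_one_le_rfind_go (s sub : List Char) (j : Nat) :
    -1 ≤ PySem.Chars.rfind.go s sub j := by
  induction j with
  | zero => rw [PySem.Chars.rfind.go]; split <;> omega
  | succ n ih => rw [PySem.Chars.rfind.go]; split; · omega
                 · exact ih

theorem neg_one_le_rfind (s sub : List Char) : -1 ≤ PySem.Chars.rfind s sub := by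
  rw [PySem.Chars.rfind]; exact neg_one_le_rfind_go s sub s.length

theorem single_isPrefixOf_iff (c : Char) (w : List Char) :
    List.isPrefixOf [c] w = true ↔ w[0]? = some c := by
  rw [List.isPrefixOf_iff_prefix, single_prefix_iff]

theorem rfind_single_neg (w : List Char) (c : Char) (hc : c ∉ w) :
    PySem.Chars.rfind w [c] = -1 := by
  rw [PySem.Chars.rfind]
  apply rfind_go_neg
  intro p _ hcon
  rw [single_isPrefixOf_iff, List.getElem?_drop] at hcon
  exact hc (List.mem_of_getElem? hcon)

theorem isPrefixOf_single_drop (c : Char) (w : List Char) (p : Nat) :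
    List.isPrefixOf [c] (w.drop p) = true ↔ w[p]? = some c := by
  rw [single_isPrefixOf_iff, List.getElem?_drop, Nat.add_zero]

theorem rfind_single_spec (v : List Char) (c : Char) :
    (c ∉ v ∧ PySem.Chars.rfind v [c] = -1) ∨
    (∃ k : Nat, k < v.length ∧ v[k]? = some c ∧ (∀ p, k < p → v[p]? ≠ some c)
       ∧ PySem.Chars.rfind v [c] = (k : Int)) := by
  induction v using List.reverseRecOn with
  | nil => exact Or.inl ⟨by simp, rfind_single_neg [] c (by simp)⟩
  | append_singleton w x ih =>
    by_cases hx : x = c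
    · subst hx
      refine Or.inr ⟨w.length, by simp, ?_, ?_, ?_⟩
      · rw [List.getElem?_append_right (le_refl _)]; simp
      · intro p hp
        rw [List.getElem?_eq_none (by simp; omega)]
        simp
      · rw [PySem.Chars.rfind]
        rw [rfind_go_pos (w ++ [x]) [x] (w ++ [x]).length w.length (by simp)
          (by rw [isPrefixOf_single_drop]
              rw [List.getElem?_append_right (le_refl _)]; simp)
          (fun p h1 h2 => by
            rw [isPrefixOf_single_drop]
            rw [List.getElem?_eq_none (by simp at h1 h2 ⊢; omega)]
            simp)]
    · rcases ih with ⟨hmem, hrf⟩ | ⟨k, hk, hg, hmax, hrf⟩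
      · refine Or.inl ⟨by simp [hmem]; exact fun hcx => hx hcx.symm, ?_⟩
        exact rfind_single_neg _ c (by simp [hmem]; exact fun hcx => hx hcx.symm)
      · refine Or.inr ⟨k, by simp; omega, ?_, ?_, ?_⟩
        · rw [List.getElem?_append_left hk]; exact hg
        · intro p hp
          by_cases hpw : p < w.length
          · rw [List.getElem?_append_left hpw]; exact hmax p hp
          · by_cases hpe : p = w.length
            · subst hpe
              rw [List.getElem?_append_right (le_refl _)]
              simp
              exact fun hcx => hx hcx
            · rw [List.getElem?_eq_none (by simp; omega)]
              simp
        · rw [PySem.Chars.rfind]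
          rw [rfind_go_pos (w ++ [x]) [c] (w ++ [x]).length k (by simp; omega)
            (by rw [isPrefixOf_single_drop, List.getElem?_append_left hk]; exact hg)
            (fun p h1 h2 => by
              rw [isPrefixOf_single_drop]
              by_cases hpw : p < w.length
              · rw [List.getElem?_append_left hpw]; exact hmax p h1
              · by_cases hpe : p = w.length
                · subst hpe
                  rw [List.getElem?_append_right (le_refl _)]
                  simp
                  exact fun hcx => hx hcx
                · rw [List.getElem?_eq_none (by simp; omega)]
                  simp)]

theorem rfind_append_cons (u v : List Char) (c : Char) :
    PySem.Chars.rfind (u ++ c :: v) [c] + 1 = (u.length : Int) + 1 + (PySem.Chars.rfind v [c] + 1) := by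
  rcases rfind_single_spec v c with ⟨hmem, hrf⟩ | ⟨k, hk, hg, hmax, hrf⟩
  · rw [hrf]
    have : PySem.Chars.rfind (u ++ c :: v) [c] = (u.length : Int) := by
      rw [PySem.Chars.rfind]
      rw [rfind_go_pos (u ++ c :: v) [c] (u ++ c :: v).length u.length (by simp)
        (by rw [isPrefixOf_single_drop, List.getElem?_append_right (le_refl _)]; simp)
        (fun p h1 h2 => by
          rw [isPrefixOf_single_drop]
          intro hcon
          rw [List.getElem?_append_right (by omega)] at hcon
          have h3 : (c :: v)[p - u.length]? = some c := hcon
          have h4 : p - u.length = (p - u.length - 1) + 1 := by omega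
          rw [h4, List.getElem?_cons_succ] at h3
          exact hmem (List.mem_of_getElem? h3))]
    rw [this]; ring
  · rw [hrf]
    have : PySem.Chars.rfind (u ++ c :: v) [c] = ((u.length + 1 + k : Nat) : Int) := by
      rw [PySem.Chars.rfind]
      rw [rfind_go_pos (u ++ c :: v) [c] (u ++ c :: v).length (u.length + 1 + k)
        (by simp; omega)
        (by rw [isPrefixOf_single_drop, List.getElem?_append_right (by omega)]
            have h4 : u.length + 1 + k - u.length = k + 1 := by omega
            rw [h4, List.getElem?_cons_succ]
            exact hg)
        (fun p h1 h2 => by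
          rw [isPrefixOf_single_drop]
          intro hcon
          rw [List.getElem?_append_right (by omega)] at hcon
          have h4 : p - u.length = (p - u.length - 1) + 1 := by omega
          rw [h4, List.getElem?_cons_succ] at hcon
          exact hmax (p - u.length - 1) (by omega) hcon)]
    rw [this]
    push_cast
    ring

-- ---------- findFrom / rfindFrom on Int positions ----------

theorem findFrom_int (s sub : List Char) (pos : Int) (h0 : 0 ≤ pos) (hl : pos ≤ s.length) :
    PySem.Chars.findFrom s sub pos none
      = if PySem.Chars.find (s.drop pos.toNat) sub = -1 then -1
        else pos + PySem.Chars.find (s.drop pos.toNat) sub := by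
  have hk : pos = ((pos.toNat : Nat) : Int) := by omega
  rw [hk, PySem.Chars.findFrom_natCast s sub pos.toNat (by omega)]
  rw [Int.toNat_natCast]

theorem rfindFrom_int (s sub : List Char) (pos : Int) (h0 : 0 ≤ pos) (hl : pos ≤ s.length) :
    PySem.Chars.rfindFrom s sub 0 (some pos) = PySem.Chars.rfind (s.take pos.toNat) sub := by
  rw [PySem.Chars.rfindFrom]
  simp only [if_neg (show ¬((s.length : Int) < pos) from by omega),
    if_neg (show ¬(pos < 0) from by omega), if_neg (show ¬((0 : Int) < 0) from by omega)]
  simp only [Int.toNat_zero, List.drop_zero]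
  split <;> omega

-- ---------- A's result is specR ----------

def expandLine (code marker line : List Char) : List (List Char) :=
  let idx := PySem.Chars.find line marker
  if idx = -1 then [line]
  else
    let indent := PySem.List.slice line none (some idx)
    [indent ++ pvBegin] ++ (PySem.Chars.splitOn code ['\n']).map (fun cl => indent ++ cl)
      ++ [indent ++ pvEnd]

theorem flatten_map_singleton (ind : List Char) (parts : List (List Char)) :
    (List.map (fun x => [ind ++ x]) parts).flatten = List.map (fun cl => ind ++ cl) parts := by
  induction parts with
  | nil => rfl
  | cons p r ih => simp [ih]

theorem expandLine_ne_nil (code marker line : List Char) : expandLine code marker line ≠ [] := by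
  by_cases hidx : PySem.Chars.find line marker = -1 <;> simp [expandLine, hidx]

theorem core_eq_flatMap (template code marker : List Char) :
    insertCodeCore template code marker
      = PySem.Chars.join ['\n']
          ((PySem.Chars.splitOn template ['\n']).flatMap (expandLine code marker)) := by
  show PySem.Chars.join ['\n']
      ((PySem.Chars.splitOn template ['\n']).foldl (fun out line =>
        let idx := PySem.Chars.find line marker
        if idx = -1 then out ++ [line]
        else
          let indent := PySem.List.slice line none (some idx)
          let out := out ++ [indent ++ pvBegin]
          let out := (PySem.Chars.splitOn code ['\n']).foldl
            (fun out codeLine => out ++ [indent ++ codeLine]) out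
          out ++ [indent ++ pvEnd]) []) = _
  have hstep : (fun (out : List (List Char)) (line : List Char) =>
      let idx := PySem.Chars.find line marker
      if idx = -1 then out ++ [line]
      else
        let indent := PySem.List.slice line none (some idx)
        let out2 := out ++ [indent ++ pvBegin]
        let out3 := (PySem.Chars.splitOn code ['\n']).foldl
          (fun out codeLine => out ++ [indent ++ codeLine]) out2
        out3 ++ [indent ++ pvEnd])
      = fun out line => out ++ expandLine code marker line := by
    funext out line
    by_cases hidx : PySem.Chars.find line marker = -1
    · simp [expandLine, hidx]
    · simp [expandLine, hidx]
      exact flatten_map_singleton _ _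
  rw [hstep, PySem.List.foldl_append_eq_flatMap]
  simp

theorem join_flatMap {α : Type} (sep : List Char) (f : α → List (List Char)) (xs : List α)
    (h : ∀ x ∈ xs, f x ≠ []) :
    PySem.Chars.join sep (xs.flatMap f)
      = PySem.Chars.join sep (xs.map (fun x => PySem.Chars.join sep (f x))) := by
  induction xs with
  | nil => rfl
  | cons x xs ih =>
    cases xs with
    | nil => simp [PySem.Chars.join_singleton]
    | cons y r =>
      have hfx := h x (by simp)
      have hrest : (y :: r).flatMap f ≠ [] := by
        simp only [List.flatMap_cons]
        intro hcon
        exact h y (by simp) (List.append_eq_nil_iff.mp hcon).1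
      have hjoin : PySem.Chars.join sep (f x ++ (y :: r).flatMap f)
          = PySem.Chars.join sep (f x) ++ sep ++ PySem.Chars.join sep ((y :: r).flatMap f) :=
        join_append_ne sep _ _ hfx hrest
      rw [List.flatMap_cons, hjoin, ih (fun z hz => h z (List.mem_cons_of_mem x hz)),
        show (x :: y :: r).map (fun z => PySem.Chars.join sep (f z))
            = PySem.Chars.join sep (f x) :: (y :: r).map (fun z => PySem.Chars.join sep (f z)) from rfl,
        join_cons_ne sep _ _ (by simp)]

theorem join_expandLine (code marker line : List Char) :
    PySem.Chars.join ['\n'] (expandLine code marker line) = render1 code marker line := by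
  by_cases hidx : PySem.Chars.find line marker = -1
  · simp [expandLine, render1, hidx, PySem.Chars.join_singleton]
  · simp [expandLine, render1, hidx, blockFor]

theorem core_eq_spec (template code marker : List Char) :
    insertCodeCore template code marker = specR code marker template := by
  rw [core_eq_flatMap,
    join_flatMap ['\n'] (expandLine code marker) _ (fun x _ => expandLine_ne_nil code marker x)]
  unfold specR
  congr 1
  exact List.map_congr_left (fun x _ => join_expandLine code marker x)

-- ---------- B's loop produces specR ----------

theorem specR_id (code marker s : List Char) (h : ∀ line ∈ PySem.Chars.splitOn s ['\n'],
    PySem.Chars.find line marker = -1) : specR code marker s = s := by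
  unfold specR
  have hmap : (PySem.Chars.splitOn s ['\n']).map (render1 code marker)
      = (PySem.Chars.splitOn s ['\n']).map id :=
    List.map_congr_left (fun line hline => by simp [render1, h line hline])
  rw [hmap, List.map_id]
  exact join_splitOn_self '\n' s

theorem goB_line (code marker s out : List Char) (hs : '\n' ∉ s) :
    goB code marker out s = out ++ render1 code marker s := by
  by_cases hpos : PySem.Chars.find s marker = -1
  · rw [goB]
    simp only [hpos, render1, if_pos]
    simp
  · have h0 : 0 ≤ PySem.Chars.find s marker := by
      have := PySem.Chars.neg_one_le_find s marker
      omega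
    have hlen : PySem.Chars.find s marker ≤ (s.length : Int) :=
      PySem.Chars.find_le_length s marker
    have hrf : PySem.Chars.rfindFrom s ['\n'] 0 (some (PySem.Chars.find s marker)) = -1 := by
      rw [rfindFrom_int s ['\n'] _ h0 hlen]
      exact rfind_single_neg _ '\n' (fun hmem => hs ((List.take_prefix _ s).sublist.subset hmem))
    have hff : PySem.Chars.findFrom s ['\n'] (PySem.Chars.find s marker) none = -1 := by
      rw [findFrom_int s ['\n'] _ h0 hlen, if_pos]
      exact find_single_neg _ '\n' (fun hmem => hs ((List.drop_suffix _ s).sublist.subset hmem))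
    rw [goB]
    simp only [hpos, hrf, hff]
    rw [render1, if_neg hpos]
    have hz : (-1 : Int) + 1 = 0 := by omega
    rw [hz, PySem.List.slice_to s (by omega : (0:Int) ≤ 0)]
    simp

theorem take_append_cons (u v : List Char) (c : Char) (k : Nat) :
    List.take (u.length + 1 + k) (u ++ c :: v) = u ++ c :: List.take k v := by
  rw [show u.length + 1 + k = u.length + (1 + k) from by omega, List.take_append,
    List.take_of_length_le (by omega), show u.length + (1 + k) - u.length = k + 1 from by omega,
    List.take_succ_cons]

theorem drop_append_cons (u v : List Char) (c : Char) (k : Nat) :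
    List.drop (u.length + 1 + k) (u ++ c :: v) = List.drop k v := by
  rw [drop_append_cons_gt u v c _ (by omega)]
  congr 1
  omega

theorem goB_first (code marker l t out : List Char) (hm : '\n' ∉ marker) (hl : '\n' ∉ l)
    (hidx : ¬ PySem.Chars.find l marker = -1) :
    goB code marker out (l ++ '\n' :: t)
      = goB code marker
          (out ++ blockFor code (PySem.List.slice l none (some (PySem.Chars.find l marker))) ++ ['\n']) t := by
  have h0 : 0 ≤ PySem.Chars.find l marker := by
    have := PySem.Chars.neg_one_le_find l marker
    omega
  have hlenl : PySem.Chars.find l marker ≤ (l.length : Int) := PySem.Chars.find_le_length l marker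
  have hpos : PySem.Chars.find (l ++ '\n' :: t) marker = PySem.Chars.find l marker :=
    find_append_left l t marker '\n' h0 hm
  have hposne : ¬ PySem.Chars.find (l ++ '\n' :: t) marker = -1 := by rw [hpos]; exact hidx
  have hlens : PySem.Chars.find (l ++ '\n' :: t) marker ≤ ((l ++ '\n' :: t).length : Int) := by
    rw [hpos]; simp; omega
  have htake : List.take (PySem.Chars.find l marker).toNat (l ++ '\n' :: t)
      = List.take (PySem.Chars.find l marker).toNat l :=
    List.take_append_of_le_length (by omega)
  have hrf : PySem.Chars.rfindFrom (l ++ '\n' :: t) ['\n'] 0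
      (some (PySem.Chars.find (l ++ '\n' :: t) marker)) = -1 := by
    rw [hpos, rfindFrom_int _ ['\n'] _ h0 (by simp; omega), htake]
    exact rfind_single_neg _ '\n' (fun hmem => hl ((List.take_prefix _ l).sublist.subset hmem))
  have hdrop : List.drop (PySem.Chars.find l marker).toNat (l ++ '\n' :: t)
      = List.drop (PySem.Chars.find l marker).toNat l ++ '\n' :: t :=
    List.drop_append_of_le_length (by omega)
  have hff : PySem.Chars.findFrom (l ++ '\n' :: t) ['\n']
      (PySem.Chars.find (l ++ '\n' :: t) marker) none = (l.length : Int) := by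
    rw [hpos, findFrom_int _ ['\n'] _ h0 (by simp; omega), hdrop,
      find_no_sep _ t '\n' (fun hmem => hl ((List.drop_suffix _ l).sublist.subset hmem))]
    rw [if_neg (by simp)]
    simp
    omega
  have hffne : ¬ PySem.Chars.findFrom (l ++ '\n' :: t) ['\n']
      (PySem.Chars.find (l ++ '\n' :: t) marker) none = -1 := by
    rw [hff]; omega
  rw [goB]
  simp only [hposne, hff, hrf]
  rw [dif_neg not_false]
  rw [dif_neg (show ¬ ((l.length : Int) = -1) from by omega)]
  have hz : (-1 : Int) + 1 = 0 := by omega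
  rw [hz]
  rw [PySem.List.slice_to (l ++ '\n' :: t) (by omega : (0:Int) ≤ 0)]
  rw [PySem.List.slice_from (l ++ '\n' :: t) (by omega : (0:Int) ≤ (l.length : Int) + 1)]
  have hdt : List.drop ((l.length : Int) + 1).toNat (l ++ '\n' :: t) = t := by
    have he : ((l.length : Int) + 1).toNat = l.length + 1 + 0 := by omega
    rw [he, drop_append_cons]
    simp
  rw [hdt]
  have hsl : PySem.List.slice (l ++ '\n' :: t) (some 0)
        (some (PySem.Chars.find (l ++ '\n' :: t) marker))
      = PySem.List.slice l none (some (PySem.Chars.find l marker)) := by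
    rw [PySem.List.slice_zero_start, hpos, PySem.List.slice_to _ h0,
      PySem.List.slice_to l h0, htake]
  rw [hsl]
  simp

theorem goB_shift (code marker l t out : List Char) (hm : '\n' ∉ marker) (_hl : '\n' ∉ l)
    (hfl : ¬ marker <:+: l) (hs : marker <:+: (l ++ '\n' :: t)) :
    goB code marker out (l ++ '\n' :: t) = goB code marker (out ++ l ++ ['\n']) t := by
  have hptinf : marker <:+: t := infix_trichotomy l t marker '\n' hm hs hfl
  have hpt0 : 0 ≤ PySem.Chars.find t marker := (PySem.Chars.find_nonneg_iff t marker).mpr hptinf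
  have hptlen : PySem.Chars.find t marker ≤ (t.length : Int) := PySem.Chars.find_le_length t marker
  have hptne : ¬ PySem.Chars.find t marker = -1 := by omega
  have hpos : PySem.Chars.find (l ++ '\n' :: t) marker
      = (l.length : Int) + 1 + PySem.Chars.find t marker :=
    find_append_right l t marker '\n' hm hfl hpt0
  have hposne : ¬ PySem.Chars.find (l ++ '\n' :: t) marker = -1 := by omega
  have hlens : ((l ++ '\n' :: t).length : Int) = (l.length : Int) + 1 + t.length := by
    simp
    omega
  have hposnat : (PySem.Chars.find (l ++ '\n' :: t) marker).toNat
      = l.length + 1 + (PySem.Chars.find t marker).toNat := by omega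
  have htakes : List.take (PySem.Chars.find (l ++ '\n' :: t) marker).toNat (l ++ '\n' :: t)
      = l ++ '\n' :: List.take (PySem.Chars.find t marker).toNat t := by
    rw [hposnat, take_append_cons]
  have hdrops : List.drop (PySem.Chars.find (l ++ '\n' :: t) marker).toNat (l ++ '\n' :: t)
      = List.drop (PySem.Chars.find t marker).toNat t := by
    rw [hposnat, drop_append_cons]
  have hrft0 : -1 ≤ PySem.Chars.rfindFrom t ['\n'] 0 (some (PySem.Chars.find t marker)) := by
    rw [rfindFrom_int t ['\n'] _ hpt0 hptlen]
    exact neg_one_le_rfind _ _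
  have hrfs : PySem.Chars.rfindFrom (l ++ '\n' :: t) ['\n'] 0
        (some (PySem.Chars.find (l ++ '\n' :: t) marker))
      = (l.length : Int) + 1 + PySem.Chars.rfindFrom t ['\n'] 0 (some (PySem.Chars.find t marker)) := by
    rw [rfindFrom_int _ ['\n'] _ (by omega) (by omega), rfindFrom_int t ['\n'] _ hpt0 hptlen,
      htakes]
    have := rfind_append_cons l (List.take (PySem.Chars.find t marker).toNat t) '\n'
    omega
  have hslnone : PySem.List.slice (l ++ '\n' :: t) none
        (some (PySem.Chars.rfindFrom (l ++ '\n' :: t) ['\n'] 0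
          (some (PySem.Chars.find (l ++ '\n' :: t) marker)) + 1))
      = l ++ '\n' :: PySem.List.slice t none
          (some (PySem.Chars.rfindFrom t ['\n'] 0 (some (PySem.Chars.find t marker)) + 1)) := by
    rw [hrfs, PySem.List.slice_to _ (by omega), PySem.List.slice_to t (by omega)]
    rw [show ((l.length : Int) + 1 + PySem.Chars.rfindFrom t ['\n'] 0
          (some (PySem.Chars.find t marker)) + 1).toNat
        = l.length + 1 + (PySem.Chars.rfindFrom t ['\n'] 0 (some (PySem.Chars.find t marker))
            + 1).toNat from by omega]
    rw [take_append_cons]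
  have hindent : PySem.List.slice (l ++ '\n' :: t)
        (some (PySem.Chars.rfindFrom (l ++ '\n' :: t) ['\n'] 0
          (some (PySem.Chars.find (l ++ '\n' :: t) marker)) + 1))
        (some (PySem.Chars.find (l ++ '\n' :: t) marker))
      = PySem.List.slice t
          (some (PySem.Chars.rfindFrom t ['\n'] 0 (some (PySem.Chars.find t marker)) + 1))
          (some (PySem.Chars.find t marker)) := by
    rw [hrfs, hpos, PySem.List.slice_toNat _ (by omega) (by omega),
      PySem.List.slice_toNat t (by omega) (by omega)]
    rw [show ((l.length : Int) + 1 + PySem.Chars.rfindFrom t ['\n'] 0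
          (some (PySem.Chars.find t marker)) + 1).toNat
        = l.length + 1 + (PySem.Chars.rfindFrom t ['\n'] 0 (some (PySem.Chars.find t marker))
            + 1).toNat from by omega]
    rw [drop_append_cons]
    congr 1
    omega
  have hF0 : -1 ≤ PySem.Chars.find (List.drop (PySem.Chars.find t marker).toNat t) ['\n'] :=
    PySem.Chars.neg_one_le_find _ _
  have hffs : PySem.Chars.findFrom (l ++ '\n' :: t) ['\n']
        (PySem.Chars.find (l ++ '\n' :: t) marker) none
      = if PySem.Chars.find (List.drop (PySem.Chars.find t marker).toNat t) ['\n'] = -1 then -1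
        else PySem.Chars.find (l ++ '\n' :: t) marker
          + PySem.Chars.find (List.drop (PySem.Chars.find t marker).toNat t) ['\n'] := by
    rw [findFrom_int _ ['\n'] _ (by omega) (by omega), hdrops]
  have hfft : PySem.Chars.findFrom t ['\n'] (PySem.Chars.find t marker) none
      = if PySem.Chars.find (List.drop (PySem.Chars.find t marker).toNat t) ['\n'] = -1 then -1
        else PySem.Chars.find t marker
          + PySem.Chars.find (List.drop (PySem.Chars.find t marker).toNat t) ['\n'] := by
    rw [findFrom_int t ['\n'] _ hpt0 hptlen]
  rw [goB, goB]
  rw [dif_neg hposne, dif_neg hptne]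
  by_cases hF : PySem.Chars.find (List.drop (PySem.Chars.find t marker).toNat t) ['\n'] = -1
  · rw [hffs, hfft, if_pos hF, if_pos hF]
    rw [dif_pos rfl, dif_pos rfl, hslnone, hindent]
    simp
  · rw [hffs, hfft, if_neg hF, if_neg hF]
    rw [dif_neg (by omega), dif_neg (by omega)]
    rw [hslnone, hindent]
    have hrec : PySem.List.slice (l ++ '\n' :: t)
          (some (PySem.Chars.find (l ++ '\n' :: t) marker
            + PySem.Chars.find (List.drop (PySem.Chars.find t marker).toNat t) ['\n'] + 1)) none
        = PySem.List.slice t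
            (some (PySem.Chars.find t marker
              + PySem.Chars.find (List.drop (PySem.Chars.find t marker).toNat t) ['\n'] + 1)) none := by
      rw [PySem.List.slice_from _ (by omega), PySem.List.slice_from t (by omega)]
      rw [show (PySem.Chars.find (l ++ '\n' :: t) marker
            + PySem.Chars.find (List.drop (PySem.Chars.find t marker).toNat t) ['\n'] + 1).toNat
          = l.length + 1 + (PySem.Chars.find t marker
            + PySem.Chars.find (List.drop (PySem.Chars.find t marker).toNat t) ['\n'] + 1).toNat
          from by omega]
      rw [drop_append_cons]
    rw [hrec]
    congr 1
    simp

theorem goB_eq (code marker : List Char) (hm : '\n' ∉ marker) :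
    ∀ (n : Nat) (s out : List Char), s.length ≤ n →
      goB code marker out s = out ++ specR code marker s := by
  intro n
  induction n with
  | zero =>
    intro s out h
    have hs : s = [] := by cases s with | nil => rfl | cons a b => simp at h
    subst hs
    rw [goB_line code marker [] out (by simp)]
    unfold specR
    rw [splitOn_no_nl '\n' [] (by simp)]
    simp [PySem.Chars.join_singleton]
  | succ n ih =>
    intro s out h
    rcases first_sep_decomp '\n' s with hno | ⟨l, t, rfl, hl⟩
    · rw [goB_line code marker s out hno]
      unfold specR
      rw [splitOn_no_nl '\n' s hno]
      simp [PySem.Chars.join_singleton]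
    · have hsplit : PySem.Chars.splitOn (l ++ '\n' :: t) ['\n']
          = l :: PySem.Chars.splitOn t ['\n'] := splitOn_split '\n' l t hl
      have hspec : specR code marker (l ++ '\n' :: t)
          = render1 code marker l ++ '\n' :: specR code marker t := by
        unfold specR
        rw [hsplit, List.map_cons, join_cons_ne _ _ _ (by
          simp [splitOn_ne_nil t ['\n']])]
        simp
      by_cases hfind : PySem.Chars.find (l ++ '\n' :: t) marker = -1
      · rw [goB]
        simp only [hfind]
        have hall : ∀ line ∈ PySem.Chars.splitOn (l ++ '\n' :: t) ['\n'],
            PySem.Chars.find line marker = -1 := by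
          intro line hline
          rw [PySem.Chars.find_eq_neg_one_iff] at hfind ⊢
          intro hcon
          exact hfind (hcon.trans (line_infix '\n' _ line hline))
        rw [specR_id code marker _ hall]
        simp
      · by_cases hfl : PySem.Chars.find l marker = -1
        · have hnotinf : ¬ marker <:+: l := by rwa [← PySem.Chars.find_eq_neg_one_iff]
          have hsinf : marker <:+: (l ++ '\n' :: t) := by
            rwa [← PySem.Chars.find_ne_neg_one_iff]
          rw [goB_shift code marker l t out hm hl hnotinf hsinf,
            ih t _ (by simp at h; omega), hspec]
          rw [render1, if_pos hfl]
          simp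
        · rw [goB_first code marker l t out hm hl hfl,
            ih t _ (by simp at h; omega), hspec]
          rw [render1, if_neg hfl]
          simp

-- ---------- assembling ----------

theorem core_eq_alt (template code marker : List Char) :
    insertCodeCore template code marker
      = (if PySem.Chars.isIn ['\n'] marker then template
         else goB code marker [] template) := by
  by_cases hnl : '\n' ∈ marker
  · rw [if_pos ((PySem.Chars.isIn_iff_infix _ _).mpr ((single_infix_iff _ _).mpr hnl))]
    rw [core_eq_spec]
    apply specR_id
    intro line hline
    rw [PySem.Chars.find_eq_neg_one_iff]
    intro hcon
    exact lines_no_sep '\n' template line hline (hcon.sublist.subset (by simp [hnl]) )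
  · rw [if_neg (show ¬ PySem.Chars.isIn ['\n'] marker = true from by
      rw [Bool.not_eq_true, PySem.Chars.isIn_eq_false_iff, single_infix_iff]
      exact hnl)]
    rw [core_eq_spec, goB_eq code marker hnl template.length template [] (le_refl _)]
    simp

-- ===== VERDICT (by name: the statement is the Claim_ definition above) =====
theorem insertCode_spec : Claim_equal_insertCode := by
  intro template code marker _
  unfold Spec_insertCode insertCode insertCode_alt
  rw [core_eq_alt]
  by_cases h : PySem.Chars.isIn ['\n'] marker.toList
  · rw [if_pos h, if_pos h]
    exact String.ofList_toList
  · rw [if_neg h, if_neg h]
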